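-- pv_equiv track=rewrite | github.com/bhavya2403/Learning-Python | Learning/Algorithms/DynamicProgramming/tile_stacking.py | tileStacking
-- ===== SOURCE A (Python) =====
-- def tileStacking(n, m, K):
--     dp = [[0 for _ in range(m+1)] for _ in range(n+1)]
--
--     for j in range(m+1):
--         dp[0][j] = 1
--     for j in range(1, m+1):
--         dp[1][j] = j
--
--     for i in range(2, n+1):
--         for j in range(1, m+1):
--             for k in range(min(i,K)+1):
--                 dp[i][j] += dp[i-k][j-1]
--
--     return dp[n][m]
-- ===== SOURCE B (Python) =====
-- def tileStacking(n, m, K):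
--     # Column-by-column DP with prefix sums over the i-dimension: O(n*m) instead of O(n*m*K).
--     prev = [1] + [0] * n                  # column j = 0: dp[0][0] = 1, dp[i][0] = 0 for i >= 1
--     for j in range(1, m + 1):
--         pref = [0]                        # pref[t+1] = prev[0] + ... + prev[t]
--         s = 0
--         for v in prev:
--             s += v
--             pref.append(s)
--         cur = [1]                         # dp[0][j] = 1
--         if n >= 1:
--             cur.append(j)                 # dp[1][j] = j
--         for i in range(2, n + 1):
--             w = min(i, K)
--             cur.append(pref[i + 1] - pref[i - w] if w >= 0 else 0)
--         prev = cur
--     return prev[n]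
-- ===== Notes on version B (the rewrite author's own statement) =====
-- stated objective: faster
-- what changed: Replaced the row-by-row triple loop (inner loop re-summing up to min(i,K)+1 previous rows per cell) by a column-by-column DP that builds a prefix-sum array of the previous column once, so each cell is an O(1) difference of two prefix sums.
import Mathlib
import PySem

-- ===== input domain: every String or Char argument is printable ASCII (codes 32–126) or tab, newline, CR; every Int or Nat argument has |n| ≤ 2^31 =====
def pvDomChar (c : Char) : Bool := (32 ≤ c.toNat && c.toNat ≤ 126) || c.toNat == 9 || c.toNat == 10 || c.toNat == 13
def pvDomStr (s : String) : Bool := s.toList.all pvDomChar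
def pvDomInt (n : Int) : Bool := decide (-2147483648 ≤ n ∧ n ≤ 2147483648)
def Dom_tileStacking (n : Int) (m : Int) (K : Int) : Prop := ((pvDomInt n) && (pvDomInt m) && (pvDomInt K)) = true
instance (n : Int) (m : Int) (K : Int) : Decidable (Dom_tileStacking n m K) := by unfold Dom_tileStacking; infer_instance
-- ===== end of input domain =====

-- B replaces A's O(n*m*K) triple-loop DP by a column-by-column DP with prefix sums (each cell an O(1) difference), an asymptotically faster exact re-implementation.


-- ===== PORT A =====
-- dp[i][j] read/write; exact here: under Pre_ every index used is nonnegative and in range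
def pvGet2 (dp : List (List Int)) (i j : Nat) : Int := (dp.getD i []).getD j 0
def pvSet2 (dp : List (List Int)) (i j : Nat) (v : Int) : List (List Int) :=
  dp.set i ((dp.getD i []).set j v)

-- dp = [[0 for _ in range(m+1)] for _ in range(n+1)]
def dpA0 (n m : Int) : List (List Int) :=
  (PySem.List.pyRange 0 (n+1) 1).map (fun _ => (PySem.List.pyRange 0 (m+1) 1).map (fun _ => (0:Int)))
-- for j in range(m+1): dp[0][j] = 1
def dpA1 (n m : Int) : List (List Int) :=
  (PySem.List.pyRange 0 (m+1) 1).foldl (fun dp j => pvSet2 dp 0 j.toNat 1) (dpA0 n m)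
-- for j in range(1, m+1): dp[1][j] = j
def dpA2 (n m : Int) : List (List Int) :=
  (PySem.List.pyRange 1 (m+1) 1).foldl (fun dp j => pvSet2 dp 1 j.toNat j) (dpA1 n m)
-- the body of 'for i in range(2, n+1)': for j …: for k …: dp[i][j] += dp[i-k][j-1]
def dpRow (m K : Int) (dp : List (List Int)) (i : Int) : List (List Int) :=
  (PySem.List.pyRange 1 (m+1) 1).foldl (fun dp j =>
    (PySem.List.pyRange 0 (min i K + 1) 1).foldl (fun dp k =>
      pvSet2 dp i.toNat j.toNat (pvGet2 dp i.toNat j.toNat + pvGet2 dp (i-k).toNat (j-1).toNat)) dp) dp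
def dpA3 (n m K : Int) : List (List Int) :=
  (PySem.List.pyRange 2 (n+1) 1).foldl (dpRow m K) (dpA2 n m)

def tileStacking (n : Int) (m : Int) (K : Int) : Int :=
  pvGet2 (dpA3 n m K) n.toNat m.toNat

-- ===== PORT B =====
-- pref = [0]; s = 0; for v in prev: s += v; pref.append(s)
def pvPrefix (xs : List Int) : List Int :=
  (xs.foldl (fun (a : List Int × Int) v => (a.1 ++ [a.2 + v], a.2 + v)) ([(0:Int)], (0:Int))).1

-- one iteration of B's outer loop: build column j from column j-1
def pvColumn (n K : Int) (j : Int) (prev : List Int) : List Int :=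
  let pref := pvPrefix prev
  let cur : List Int := [1]
  let cur := if 1 ≤ n then cur ++ [j] else cur
  (PySem.List.pyRange 2 (n+1) 1).foldl (fun cur i =>
    let w := min i K
    cur ++ [if 0 ≤ w then pref.getD (i+1).toNat 0 - pref.getD (i - w).toNat 0 else 0]) cur

def tileStacking_alt (n : Int) (m : Int) (K : Int) : Int :=
  ((PySem.List.pyRange 1 (m+1) 1).foldl (fun prev j => pvColumn n K j prev)
    ((1:Int) :: List.replicate n.toNat 0)).getD n.toNat 0

-- ===== PRECONDITION & SPEC =====
-- A raises IndexError exactly when n < 0, m < 0, or n = 0 < m; Pre_ excludes only those.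
def Pre_tileStacking (n : Int) (m : Int) (K : Int) : Prop := 0 ≤ n ∧ 0 ≤ m ∧ (n = 0 → m = 0)
instance (n : Int) (m : Int) (K : Int) : Decidable (Pre_tileStacking n m K) := by
  unfold Pre_tileStacking; infer_instance
def pvWitness_tileStacking : Int × Int × Int := (4, 3, 2)

def Spec_tileStacking (n : Int) (m : Int) (K : Int) (out : Int) : Prop := out = tileStacking_alt n m K
instance (n : Int) (m : Int) (K : Int) (out : Int) : Decidable (Spec_tileStacking n m K out) := by
  unfold Spec_tileStacking; infer_instance

-- ===== CLAIM (what is proved, stated in full; the proofs are below) =====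
def Claim_equal_tileStacking : Prop := ∀ (n : Int) (m : Int) (K : Int), Dom_tileStacking n m K → Pre_tileStacking n m K → Spec_tileStacking n m K (tileStacking n m K)

-- ===== LEMMAS AND PROOFS =====

-- the mathematical table: colF K j i = dp[i][j]
def colF (K : Int) : Nat → Nat → Int
  | 0, i => if i = 0 then 1 else 0
  | j+1, i =>
    if i = 0 then 1
    else if i = 1 then (j : Int) + 1
    else ((PySem.List.pyRange 0 (min (i:Int) K + 1) 1).map (fun k => colF K j (i - k.toNat))).sum

lemma colF_zero_right (K : Int) (j : Nat) : colF K j 0 = 1 := by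
  cases j <;> simp [colF]

lemma colF_one_right (K : Int) (j : Nat) : colF K j 1 = (j : Int) := by
  cases j <;> simp [colF]

lemma colF_zero_left (K : Int) (i : Nat) (hi : 1 ≤ i) : colF K 0 i = 0 := by
  simp [colF]; omega

lemma colF_two (K : Int) (s i : Nat) (hi : 2 ≤ i) :
    colF K (s+1) i = ((PySem.List.pyRange 0 (min (i:Int) K + 1) 1).map (fun k => colF K s (i - k.toNat))).sum := by
  rw [colF]
  have h0 : ¬ i = 0 := by omega
  have h1 : ¬ i = 1 := by omega
  simp [h0, h1]

-- getD after set (in-range index)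
lemma pvGetD_set {α : Type} (xs : List α) (i : Nat) (v d : α) (j : Nat) (hi : i < xs.length) :
    (xs.set i v).getD j d = if j = i then v else xs.getD j d := by
  by_cases hj : j = i
  · subst hj; simp [List.getD, hi]
  · simp only [List.getD, if_neg hj]
    rw [List.getElem?_set]
    simp [Ne.symm hj]

def ShapeDP (N M : Nat) (dp : List (List Int)) : Prop :=
  dp.length = N + 1 ∧ ∀ r ∈ dp, r.length = M + 1

lemma rowLen {N M : Nat} {dp : List (List Int)} (h : ShapeDP N M dp) (i : Nat) (hi : i ≤ N) :
    (dp.getD i []).length = M + 1 := by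
  have h1 := h.1
  have hlt : i < dp.length := by omega
  rw [List.getD_eq_getElem _ _ hlt]
  exact h.2 _ (List.getElem_mem hlt)

lemma shape_set2 {N M : Nat} {dp : List (List Int)} (h : ShapeDP N M dp) (i j : Nat) (hi : i ≤ N) (v : Int) :
    ShapeDP N M (pvSet2 dp i j v) := by
  refine ⟨by simp [pvSet2, h.1], ?_⟩
  intro r hr
  rcases List.mem_or_eq_of_mem_set hr with hmem | rfl
  · exact h.2 r hmem
  · rw [List.length_set]
    exact rowLen h i hi

lemma pvGet2_pvSet2 {N M : Nat} {dp : List (List Int)} (h : ShapeDP N M dp)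
    (i j : Nat) (hi : i ≤ N) (hj : j ≤ M) (v : Int) (i' j' : Nat) :
    pvGet2 (pvSet2 dp i j v) i' j' = if i' = i ∧ j' = j then v else pvGet2 dp i' j' := by
  have h1 := h.1
  have hilt : i < dp.length := by omega
  have hjlt : j < (dp.getD i []).length := by rw [rowLen h i hi]; omega
  unfold pvGet2 pvSet2
  rw [pvGetD_set _ _ _ _ _ hilt]
  by_cases hii : i' = i
  · rw [if_pos hii, pvGetD_set _ _ _ _ _ hjlt]
    by_cases hjj : j' = j
    · simp [hii, hjj]
    · simp [hii, hjj]
  · rw [if_neg hii]; simp [hii]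

-- generic fold-with-invariant over range(a, b)
lemma foldl_pyRange_inv {α : Type} (P : Int → α → Prop) (f : α → Int → α) (b : Int) :
    ∀ (d : Nat) (a : Int) (init : α), (b - a).toNat = d → a ≤ b → P a init →
      (∀ x j, a ≤ j → j < b → P j x → P (j+1) (f x j)) →
      P b ((PySem.List.pyRange a b 1).foldl f init) := by
  intro d
  induction d with
  | zero =>
    intro a init hd hab h0 _
    have hba : b = a := by omega
    subst hba
    rw [PySem.List.pyRange_one_eq_nil le_rfl]
    exact h0
  | succ d ih =>
    intro a init hd hab h0 hstep
    have hlt : a < b := by omega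
    rw [PySem.List.pyRange_one_cons hlt]
    simp only [List.foldl_cons]
    exact ih (a+1) (f init a) (by omega) (by omega)
      (hstep init a le_rfl hlt h0)
      (fun x j hj1 hj2 hx => hstep x j (by omega) hj2 hx)

-- k-loop: repeatedly dp[I][J] += dp[r1 k][r2 k], where the read cell is never (I,J)
lemma kfold_spec {N M : Nat} (I J : Nat) (hIN : I ≤ N) (hJM : J ≤ M) (r1 r2 : Int → Nat) :
    ∀ (L : List Int), (∀ k ∈ L, r2 k ≠ J) → ∀ (dp : List (List Int)), ShapeDP N M dp →
      ShapeDP N M (L.foldl (fun dp k => pvSet2 dp I J (pvGet2 dp I J + pvGet2 dp (r1 k) (r2 k))) dp) ∧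
      (∀ i' j', ¬(i' = I ∧ j' = J) →
        pvGet2 (L.foldl (fun dp k => pvSet2 dp I J (pvGet2 dp I J + pvGet2 dp (r1 k) (r2 k))) dp) i' j' = pvGet2 dp i' j') ∧
      pvGet2 (L.foldl (fun dp k => pvSet2 dp I J (pvGet2 dp I J + pvGet2 dp (r1 k) (r2 k))) dp) I J
        = pvGet2 dp I J + (L.map (fun k => pvGet2 dp (r1 k) (r2 k))).sum := by
  intro L
  induction L with
  | nil => intro _ dp hdp; refine ⟨hdp, fun _ _ _ => rfl, by simp⟩
  | cons k0 L ih =>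
    intro hr dp hdp
    have hr0 : r2 k0 ≠ J := hr k0 (by simp)
    set dp1 := pvSet2 dp I J (pvGet2 dp I J + pvGet2 dp (r1 k0) (r2 k0)) with hdp1
    have hshape1 : ShapeDP N M dp1 := shape_set2 hdp I J hIN _
    have hunch : ∀ i' j', ¬(i' = I ∧ j' = J) → pvGet2 dp1 i' j' = pvGet2 dp i' j' := by
      intro i' j' hne
      rw [hdp1, pvGet2_pvSet2 hdp I J hIN hJM _ i' j', if_neg hne]
    obtain ⟨s3, u3, g3⟩ := ih (fun k hk => hr k (by simp [hk])) dp1 hshape1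
    simp only [List.foldl_cons]
    refine ⟨s3, ?_, ?_⟩
    · intro i' j' hne
      rw [u3 i' j' hne, hunch i' j' hne]
    · rw [g3]
      have hIJ : pvGet2 dp1 I J = pvGet2 dp I J + pvGet2 dp (r1 k0) (r2 k0) := by
        rw [hdp1, pvGet2_pvSet2 hdp I J hIN hJM, if_pos ⟨rfl, rfl⟩]
      have hmap : (L.map (fun k => pvGet2 dp1 (r1 k) (r2 k))) = L.map (fun k => pvGet2 dp (r1 k) (r2 k)) := by
        apply List.map_congr_left
        intro k hk
        exact hunch _ _ (fun hc => hr k (by simp [hk]) hc.2)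
      rw [hIJ, hmap]
      simp [add_assoc]

-- loop invariants for A
def InvI (K : Int) (N M : Nat) (i : Int) (dp : List (List Int)) : Prop :=
  ShapeDP N M dp ∧ ∀ i' ≤ N, ∀ j' ≤ M,
    pvGet2 dp i' j' = if ((i':Int) < i ∨ j' = 0) then colF K j' i' else 0

def InvJ (K : Int) (N M : Nat) (i j : Int) (dp : List (List Int)) : Prop :=
  ShapeDP N M dp ∧ ∀ i' ≤ N, ∀ j' ≤ M,
    pvGet2 dp i' j' = if ((i':Int) < i ∨ j' = 0 ∨ (i' = i.toNat ∧ (j':Int) < j)) then colF K j' i' else 0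

lemma getD_all_zero (xs : List Int) (h : ∀ x ∈ xs, x = 0) (j : Nat) : xs.getD j 0 = 0 := by
  rcases hx : xs[j]? with _ | v
  · simp [List.getD, hx]
  · simp only [List.getD, hx, Option.getD_some]
    exact h v (List.mem_of_getElem? hx)

lemma dpA0_shape (n m : Int) (hn : 0 ≤ n) (hm : 0 ≤ m) : ShapeDP n.toNat m.toNat (dpA0 n m) := by
  constructor
  · simp [dpA0, PySem.List.length_pyRange_one]; omega
  · intro r hr
    simp only [dpA0, List.mem_map] at hr
    obtain ⟨x, _, rfl⟩ := hr
    simp [PySem.List.length_pyRange_one]; omega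

lemma dpA0_zero (n m : Int) (i j : Nat) : pvGet2 (dpA0 n m) i j = 0 := by
  unfold pvGet2
  apply getD_all_zero
  have hrow : ∀ r ∈ dpA0 n m, ∀ x ∈ r, x = 0 := by
    intro r hr
    simp only [dpA0, List.mem_map] at hr
    obtain ⟨x, _, rfl⟩ := hr
    intro y hy
    simp only [List.mem_map] at hy
    obtain ⟨z, _, rfl⟩ := hy
    rfl
  rcases hx : (dpA0 n m)[i]? with _ | r
  · simp [List.getD, hx]
  · simp only [List.getD, hx, Option.getD_some]
    exact hrow r (List.mem_of_getElem? hx)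

lemma dpA1_inv (n m : Int) (hn : 0 ≤ n) (hm : 0 ≤ m) :
    ShapeDP n.toNat m.toNat (dpA1 n m) ∧
    ∀ i' ≤ n.toNat, ∀ j' ≤ m.toNat, pvGet2 (dpA1 n m) i' j' = if i' = 0 then 1 else 0 := by
  have key := foldl_pyRange_inv
    (P := fun (j : Int) dp => ShapeDP n.toNat m.toNat dp ∧
      ∀ i' ≤ n.toNat, ∀ j' ≤ m.toNat,
        pvGet2 dp i' j' = if i' = 0 ∧ (j' : Int) < j then 1 else 0)
    (f := fun dp j => pvSet2 dp 0 j.toNat 1) (b := m+1) ((m+1) - 0).toNat 0 (dpA0 n m)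
    rfl (by omega)
    (⟨dpA0_shape n m hn hm, fun i' _ j' _ => by
        rw [dpA0_zero]
        have : ¬ (i' = 0 ∧ (j' : Int) < 0) := by omega
        simp [this]⟩)
    (by
      rintro dp j hj0 hj1 ⟨hsh, hval⟩
      refine ⟨shape_set2 hsh 0 j.toNat (by omega) 1, ?_⟩
      intro i' hi' j' hj'
      rw [pvGet2_pvSet2 hsh 0 j.toNat (by omega) (by omega)]
      by_cases hc : i' = 0 ∧ j' = j.toNat
      · rw [if_pos hc, if_pos (by omega)]
      · rw [if_neg hc, hval i' hi' j' hj']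
        have : (i' = 0 ∧ (j' : Int) < j) ↔ (i' = 0 ∧ (j' : Int) < j + 1) := by omega
        simp only [this])
  rw [dpA1]
  refine ⟨key.1, fun i' hi' j' hj' => ?_⟩
  rw [key.2 i' hi' j' hj']
  have : (i' = 0 ∧ (j' : Int) < m + 1) ↔ i' = 0 := by omega
  simp only [this]

lemma dpA2_inv (n m K : Int) (hn : 0 ≤ n) (hm : 0 ≤ m) (hnm : n = 0 → m = 0) :
    InvI K n.toNat m.toNat 2 (dpA2 n m) := by
  obtain ⟨hsh1, hval1⟩ := dpA1_inv n m hn hm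
  have hn1 : 1 ≤ m → 1 ≤ n := by
    intro h
    rcases lt_or_ge n 1 with h' | h'
    · have : n = 0 := by omega
      have := hnm this
      omega
    · omega
  have key := foldl_pyRange_inv
    (P := fun (j : Int) dp => ShapeDP n.toNat m.toNat dp ∧
      ∀ i' ≤ n.toNat, ∀ j' ≤ m.toNat,
        pvGet2 dp i' j' = if i' = 0 then 1
          else if i' = 1 ∧ 1 ≤ j' ∧ (j' : Int) < j then (j' : Int) else 0)
    (f := fun dp j => pvSet2 dp 1 j.toNat j) (b := m+1) ((m+1) - 1).toNat 1 (dpA1 n m)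
    rfl (by omega)
    (⟨hsh1, fun i' hi' j' hj' => by
      rw [hval1 i' hi' j' hj']
      have : ¬ (i' = 1 ∧ 1 ≤ j' ∧ (j' : Int) < 1) := by omega
      by_cases h0 : i' = 0 <;> simp [h0, this] <;> omega⟩)
    (by
      rintro dp j hj0 hj1 ⟨hsh, hval⟩
      have hn' : 1 ≤ n := hn1 (by omega)
      refine ⟨shape_set2 hsh 1 j.toNat (by omega) j, ?_⟩
      intro i' hi' j' hj'
      rw [pvGet2_pvSet2 hsh 1 j.toNat (by omega) (by omega)]
      by_cases hc : i' = 1 ∧ j' = j.toNat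
      · rw [if_pos hc]
        have h0 : ¬ i' = 0 := by omega
        rw [if_neg h0, if_pos (by omega)]
        omega
      · rw [if_neg hc, hval i' hi' j' hj']
        by_cases h0 : i' = 0
        · simp [h0]
        · rw [if_neg h0, if_neg h0]
          have : (i' = 1 ∧ 1 ≤ j' ∧ (j' : Int) < j) ↔ (i' = 1 ∧ 1 ≤ j' ∧ (j' : Int) < j + 1) := by
            omega
          simp only [this])
  rw [InvI, dpA2]
  refine ⟨key.1, fun i' hi' j' hj' => ?_⟩
  rw [key.2 i' hi' j' hj']
  by_cases h0 : i' = 0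
  · subst h0
    rw [if_pos rfl, if_pos (by omega), colF_zero_right]
  by_cases h1 : i' = 1
  · subst h1
    have hc : ((1:Nat):Int) < 2 ∨ j' = 0 := Or.inl (by norm_num)
    rw [if_neg h0, if_pos hc, colF_one_right]
    by_cases hj1 : 1 ≤ j'
    · rw [if_pos ⟨rfl, hj1, by omega⟩]
    · rw [if_neg (by omega)]
      omega
  · rw [if_neg h0, if_neg (by omega)]
    by_cases hj0 : j' = 0
    · subst hj0
      rw [if_pos (Or.inr rfl), colF_zero_left K i' (by omega)]
    · rw [if_neg (by omega)]

lemma dpRow_inv (n m K : Int) (hn : 0 ≤ n) (hm : 0 ≤ m) (i : Int) (hi2 : 2 ≤ i) (hin : i < n + 1)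
    (dp : List (List Int)) (h : InvI K n.toNat m.toNat i dp) :
    InvI K n.toNat m.toNat (i+1) (dpRow m K dp i) := by
  have key := foldl_pyRange_inv
    (P := fun (j : Int) dp => InvJ K n.toNat m.toNat i j dp)
    (f := fun dp j =>
      (PySem.List.pyRange 0 (min i K + 1) 1).foldl (fun dp k =>
        pvSet2 dp i.toNat j.toNat (pvGet2 dp i.toNat j.toNat + pvGet2 dp (i-k).toNat (j-1).toNat)) dp)
    (b := m+1) ((m+1) - 1).toNat 1 dp rfl (by omega)
    (by
      -- InvI i → InvJ i 1
      refine ⟨h.1, fun i' hi' j' hj' => ?_⟩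
      rw [h.2 i' hi' j' hj']
      have : ((i':Int) < i ∨ j' = 0) ↔ ((i':Int) < i ∨ j' = 0 ∨ (i' = i.toNat ∧ (j':Int) < 1)) := by
        omega
      simp only [this])
    (by
      rintro dp j hj1 hjm ⟨hsh, hval⟩
      have hIN : i.toNat ≤ n.toNat := by omega
      have hJM : j.toNat ≤ m.toNat := by omega
      obtain ⟨s3, u3, g3⟩ := kfold_spec i.toNat j.toNat hIN hJM
        (fun k => (i-k).toNat) (fun k => (j-1).toNat)
        (PySem.List.pyRange 0 (min i K + 1) 1)
        (fun k _ => by show (j-1).toNat ≠ j.toNat; omega) dp hsh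
      refine ⟨s3, fun i' hi' j' hj' => ?_⟩
      by_cases hcell : i' = i.toNat ∧ j' = j.toNat
      · obtain ⟨rfl, rfl⟩ := hcell
        rw [g3, hval _ hi' _ hj', if_neg (by omega), if_pos (by omega)]
        -- 0 + Σ = colF K j.toNat i.toNat
        obtain ⟨s, hs⟩ : ∃ s, j.toNat = s + 1 := ⟨j.toNat - 1, by omega⟩
        rw [hs, colF_two K s i.toNat (by omega)]
        rw [Int.toNat_of_nonneg (by omega : (0:Int) ≤ i)]
        rw [zero_add]
        congr 1
        apply List.map_congr_left
        intro k hk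
        rw [PySem.List.mem_pyRange_one] at hk
        have hki : 0 ≤ k ∧ k ≤ i := by omega
        rw [hval _ (by omega) _ (by omega)]
        have hcond : ((((i-k).toNat) : Int) < i ∨ (j-1).toNat = 0 ∨
            ((i-k).toNat = i.toNat ∧ (((j-1).toNat):Int) < j)) := by omega
        rw [if_pos hcond]
        have e1 : (j-1).toNat = s := by omega
        have e2 : (i-k).toNat = i.toNat - k.toNat := by omega
        rw [e1, e2]
      · rw [u3 i' j' hcell, hval _ hi' _ hj']
        have : ((i':Int) < i ∨ j' = 0 ∨ (i' = i.toNat ∧ (j':Int) < j)) ↔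
            ((i':Int) < i ∨ j' = 0 ∨ (i' = i.toNat ∧ (j':Int) < j + 1)) := by omega
        simp only [this])
  rw [InvI, dpRow]
  refine ⟨key.1, fun i' hi' j' hj' => ?_⟩
  rw [key.2 i' hi' j' hj']
  have : ((i':Int) < i ∨ j' = 0 ∨ (i' = i.toNat ∧ (j':Int) < m + 1)) ↔
      ((i':Int) < i + 1 ∨ j' = 0) := by omega
  simp only [this]

lemma tileStacking_eq_colF (n m K : Int) (hn : 0 ≤ n) (hm : 0 ≤ m) (hnm : n = 0 → m = 0) :
    tileStacking n m K = colF K m.toNat n.toNat := by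
  have h2 := dpA2_inv n m K hn hm hnm
  rw [tileStacking, dpA3]
  by_cases hn1 : 2 ≤ n + 1
  · have key := foldl_pyRange_inv
      (P := fun (i : Int) dp => InvI K n.toNat m.toNat i dp)
      (f := dpRow m K) (b := n+1) ((n+1) - 2).toNat 2 (dpA2 n m) rfl hn1 h2
      (fun dp i hi2 hin h => dpRow_inv n m K hn hm i hi2 hin dp h)
    rw [key.2 n.toNat le_rfl m.toNat le_rfl, if_pos (by omega)]
  · rw [PySem.List.pyRange_one_eq_nil (by omega)]
    simp only [List.foldl_nil]
    rw [h2.2 n.toNat le_rfl m.toNat le_rfl, if_pos (by omega)]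

-- B-side
lemma pvPrefix_fold (xs : List Int) : ∀ (acc : List Int) (s : Int),
    (xs.foldl (fun (a : List Int × Int) v => (a.1 ++ [a.2 + v], a.2 + v)) (acc, s)).1
      = acc ++ (List.range xs.length).map (fun t => s + (xs.take (t+1)).sum) := by
  induction xs with
  | nil => intro acc s; simp
  | cons v xs ih =>
    intro acc s
    simp only [List.foldl_cons]
    rw [ih (acc ++ [s + v]) (s + v)]
    rw [List.length_cons, List.range_succ_eq_map]
    simp only [List.map_cons, List.map_map]
    rw [List.append_assoc]
    congr 1
    simp only [List.take_succ_cons, List.sum_cons, List.singleton_append]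
    congr 1
    · simp
    · apply List.map_congr_left
      intro t _
      simp only [Function.comp_apply, Nat.succ_eq_add_one]
      ring

lemma pvPrefix_getD (xs : List Int) (u : Nat) (hu : u ≤ xs.length) :
    (pvPrefix xs).getD u 0 = (xs.take u).sum := by
  rw [pvPrefix, pvPrefix_fold xs [0] 0]
  match u with
  | 0 => simp
  | t+1 =>
    have ht : t < xs.length := by omega
    have hlen : ((List.range xs.length).map (fun t => 0 + (xs.take (t+1)).sum)).length = xs.length := by
      simp
    rw [List.singleton_append, List.getD_cons_succ]
    rw [List.getD_eq_getElem _ _ (by omega)]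
    simp [List.getElem_map, List.getElem_range]

lemma take_sum_window (xs : List Int) (t : Nat) (ht : t < xs.length) : ∀ (w : Nat), w ≤ t →
    (xs.take (t+1)).sum - (xs.take (t-w)).sum
      = ((PySem.List.pyRange 0 ((w:Int)+1) 1).map (fun k => xs.getD (t - k.toNat) 0)).sum := by
  intro w
  induction w with
  | zero =>
    intro _
    rw [show ((0:Nat):Int) + 1 = (0:Int) + 1 from by norm_num, PySem.List.pyRange_one_singleton 0]
    simp only [List.map_cons, List.map_nil, List.sum_cons, List.sum_nil, Int.toNat_zero,
      Nat.sub_zero, add_zero]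
    rw [List.sum_take_succ xs t ht, List.getD_eq_getElem _ _ ht]
    ring
  | succ w ih =>
    intro hw
    have hw' : w ≤ t := by omega
    have hsplit : PySem.List.pyRange 0 (((w+1:Nat):Int)+1) 1
        = PySem.List.pyRange 0 (((w:Nat):Int)+1) 1 ++ [((w:Nat):Int)+1] := by
      have hcast : (((w+1:Nat):Int)+1) = (((w:Nat):Int)+1) + 1 := by push_cast; ring
      rw [hcast]
      exact PySem.List.pyRange_one_succ_right (by omega)
    rw [hsplit, List.map_append, List.sum_append]
    simp only [List.map_cons, List.map_nil, List.sum_cons, List.sum_nil, add_zero]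
    have hidx : ((((w:Nat):Int)+1).toNat) = w + 1 := by omega
    rw [hidx, ← ih hw']
    have h2 : t - (w+1) < xs.length := by omega
    have hsum : (List.take (t-w) xs).sum = (List.take (t-(w+1)) xs).sum + xs[t-(w+1)] := by
      rw [show t - w = (t - (w+1)) + 1 from by omega]
      exact List.sum_take_succ xs _ h2
    rw [hsum, List.getD_eq_getElem _ _ h2]
    ring

def ColInv (K : Int) (N : Nat) (j : Int) (prev : List Int) : Prop :=
  prev.length = N + 1 ∧ ∀ t ≤ N, prev.getD t 0 = colF K (j-1).toNat t

lemma pvColumn_inv (n K : Int) (hn : 1 ≤ n) (j : Int) (hj : 1 ≤ j) (prev : List Int)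
    (h : ColInv K n.toNat j prev) : ColInv K n.toNat (j+1) (pvColumn n K j prev) := by
  obtain ⟨hlen, hval⟩ := h
  rw [pvColumn]
  simp only [if_pos hn]
  rw [PySem.List.foldl_append_singleton_eq_map
    (fun i => if 0 ≤ min i K then (pvPrefix prev).getD (i+1).toNat 0 - (pvPrefix prev).getD (i - min i K).toNat 0 else 0)]
  have hjj : (j + 1 - 1) = j := by ring
  constructor
  · simp only [List.length_append, List.length_map, PySem.List.length_pyRange_one,
      List.length_cons, List.length_nil]
    omega
  · intro t ht
    rw [hjj]
    match t, ht with
    | 0, _ =>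
      rw [List.getD_append _ _ _ _ (by simp)]
      simp [colF_zero_right]
    | 1, _ =>
      rw [List.getD_append _ _ _ _ (by simp), colF_one_right]
      simp only [List.singleton_append, List.getD_cons_succ, List.getD_cons_zero]
      omega
    | (t''+2), ht =>
      have hlen2 : ([(1:Int)] ++ [j]).length = 2 := by simp
      rw [List.getD_append_right _ _ _ _ (by simp)]
      have hN : t'' + 2 ≤ n.toNat := ht
      have hmaplen : t'' + 2 - ([(1:Int)] ++ [j]).length
          < ((PySem.List.pyRange 2 (n+1) 1).map
            (fun i => if 0 ≤ min i K then (pvPrefix prev).getD (i+1).toNat 0 - (pvPrefix prev).getD (i - min i K).toNat 0 else 0)).length := by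
        simp only [List.length_map, PySem.List.length_pyRange_one, List.length_append,
          List.length_cons, List.length_nil]
        omega
      rw [List.getD_eq_getElem _ _ hmaplen, List.getElem_map, PySem.List.getElem_pyRange_one]
      have hidx : (2 : Int) + ↑(t'' + 2 - ([(1:Int)] ++ [j]).length) = ((t''+2 : Nat) : Int) := by
        simp only [List.length_append, List.length_cons, List.length_nil]
        push_cast
        omega
      rw [hidx]
      set t := t'' + 2 with hT
      by_cases hw : 0 ≤ min ((t:Nat):Int) K
      · rw [if_pos hw]
        set w := min ((t:Nat):Int) K with hwdef
        have hwt : w ≤ (t:Int) := by omega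
        have h1 : ((t:Int)+1).toNat = t + 1 := by omega
        have h2 : ((t:Int) - w).toNat = t - w.toNat := by omega
        rw [h1, h2]
        rw [pvPrefix_getD prev (t+1) (by omega), pvPrefix_getD prev (t - w.toNat) (by omega)]
        rw [take_sum_window prev t (by omega) w.toNat (by omega)]
        obtain ⟨s, hs⟩ : ∃ s, j.toNat = s + 1 := ⟨j.toNat - 1, by omega⟩
        rw [hs, colF_two K s t (by omega)]
        have hcast : ((w.toNat : Int)) + 1 = min ((t:Nat):Int) K + 1 := by omega
        rw [hcast]
        congr 1
        apply List.map_congr_left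
        intro k hk
        rw [PySem.List.mem_pyRange_one] at hk
        rw [hval (t - k.toNat) (by omega)]
        congr 1
        omega
      · rw [if_neg hw]
        obtain ⟨s, hs⟩ : ∃ s, j.toNat = s + 1 := ⟨j.toNat - 1, by omega⟩
        rw [hs, colF_two K s t (by omega)]
        rw [PySem.List.pyRange_one_eq_nil (by omega)]
        simp

lemma tileStacking_alt_eq_colF (n m K : Int) (hn : 0 ≤ n) (hm : 0 ≤ m) (hnm : n = 0 → m = 0) :
    tileStacking_alt n m K = colF K m.toNat n.toNat := by
  rw [tileStacking_alt]
  have hinit : ColInv K n.toNat 1 ((1:Int) :: List.replicate n.toNat 0) := by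
    constructor
    · simp
    · intro t ht
      match t with
      | 0 => simp [colF_zero_right]
      | t''+1 =>
        rw [List.getD_cons_succ, List.getD_replicate _ (by omega)]
        rw [show ((1:Int) - 1).toNat = 0 from by omega, colF_zero_left K _ (by omega)]
  by_cases hm1 : 1 ≤ m
  · have hn' : 1 ≤ n := by
      rcases lt_or_ge n 1 with h' | h'
      · have h0 : n = 0 := by omega
        have := hnm h0
        omega
      · omega
    have key := foldl_pyRange_inv
      (P := fun (j : Int) prev => ColInv K n.toNat j prev)
      (f := fun prev j => pvColumn n K j prev) (b := m+1) ((m+1) - 1).toNat 1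
      ((1:Int) :: List.replicate n.toNat 0) rfl (by omega) hinit
      (fun prev j hj1 _ h => pvColumn_inv n K hn' j hj1 prev h)
    have := key.2 n.toNat le_rfl
    rwa [show m + 1 - 1 = m from by ring] at this
  · have hm0 : m = 0 := by omega
    rw [PySem.List.pyRange_one_eq_nil (by omega)]
    simp only [List.foldl_nil]
    have := hinit.2 n.toNat le_rfl
    rwa [show (1:Int) - 1 = 1 - 1 from rfl, show ((1:Int) - 1).toNat = m.toNat from by omega] at this

-- ===== VERDICT (by name: the statement is the Claim_ definition above) =====
theorem tileStacking_spec : Claim_equal_tileStacking := by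
  intro n m K _hdom hpre
  unfold Spec_tileStacking
  obtain ⟨hn, hm, hnm⟩ := hpre
  rw [tileStacking_eq_colF n m K hn hm hnm, tileStacking_alt_eq_colF n m K hn hm hnm]
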